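-- pv_equiv track=rewrite | github.com/thehipsterciso/widai-dataset | strm/gap_detection.py | compute_overall_severity
-- ===== SOURCE A (Python) =====
-- def compute_overall_severity(signals):
--     """Compute the highest severity across all signals."""
--     if not signals:
--         return None
--     severities = [s["severity"] for s in signals]
--     if "critical" in severities:
--         return "critical"
--     if "moderate" in severities:
--         return "moderate"
--     return "low"
-- ===== SOURCE B (Python) =====
-- def compute_overall_severity(signals):
--     """Compute the highest severity across all signals."""
--     if not signals:
--         return None
--     rank = {"critical": 3, "moderate": 2}
--     best = 1
--     for s in signals:
--         best = max(best, rank.get(s["severity"], 1))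
--     return {3: "critical", 2: "moderate", 1: "low"}[best]
-- ===== Notes on version B (the rewrite author's own statement) =====
-- stated objective: alternative
-- what changed: Replaced the build-a-severities-list-plus-two-membership-scans with a single accumulator pass keeping a running maximum numeric rank (critical=3, moderate=2, other=1) that is mapped back to a name at the end.
import Mathlib
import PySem

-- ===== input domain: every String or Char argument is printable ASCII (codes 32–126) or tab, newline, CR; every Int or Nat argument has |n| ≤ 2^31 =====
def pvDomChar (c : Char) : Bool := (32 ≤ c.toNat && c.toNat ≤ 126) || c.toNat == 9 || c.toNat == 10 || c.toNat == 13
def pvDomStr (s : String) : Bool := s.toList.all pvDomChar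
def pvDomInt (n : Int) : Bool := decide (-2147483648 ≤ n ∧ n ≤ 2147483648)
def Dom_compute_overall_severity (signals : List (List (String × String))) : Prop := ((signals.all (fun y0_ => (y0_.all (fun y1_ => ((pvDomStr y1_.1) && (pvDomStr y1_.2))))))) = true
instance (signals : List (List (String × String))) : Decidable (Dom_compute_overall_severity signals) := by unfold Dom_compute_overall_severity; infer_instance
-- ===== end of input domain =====

-- ===== PORT A =====
-- B replaces A's severities-list plus two membership scans by a single running-maximum-rank pass (objective: alternative).
-- dict lookup s["severity"]: first match in the association list; none = KeyError (excluded by Pre_)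
def pvGetSeverity (s : List (String × String)) : Option String :=
  (s.find? (fun p => p.1 == "severity")).map (·.2)

def compute_overall_severity (signals : List (List (String × String))) : Option String :=
  if signals = [] then none
  else
    let severities := signals.map pvGetSeverity
    if (some "critical") ∈ severities then some "critical"
    else if (some "moderate") ∈ severities then some "moderate"
    else some "low"

-- ===== PORT B =====
def pvRankOf (o : Option String) : Int :=
  if o = some "critical" then 3 else if o = some "moderate" then 2 else 1

def compute_overall_severity_alt (signals : List (List (String × String))) : Option String :=
  if signals = [] then none
  else
    let best := signals.foldl (fun acc s => max acc (pvRankOf (pvGetSeverity s))) 1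
    if best = 3 then some "critical" else if best = 2 then some "moderate" else some "low"

-- ===== PRECONDITION & SPEC =====
-- Pre_ excludes exactly the inputs on which Python A raises KeyError: a signal without a "severity" key.
def Pre_compute_overall_severity (signals : List (List (String × String))) : Prop :=
  ∀ s ∈ signals, (pvGetSeverity s).isSome = true
instance (signals : List (List (String × String))) : Decidable (Pre_compute_overall_severity signals) := by
  unfold Pre_compute_overall_severity; infer_instance
def pvWitness_compute_overall_severity : (List (List (String × String))) :=
  [[("severity", "moderate")], [("severity", "low")]]
def Spec_compute_overall_severity (signals : List (List (String × String))) (out : Option String) : Prop := out = compute_overall_severity_alt signals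
instance (signals : List (List (String × String))) (out : Option String) : Decidable (Spec_compute_overall_severity signals out) := by unfold Spec_compute_overall_severity; infer_instance

-- ===== CLAIM (what is proved, stated in full; the proofs are below) =====
def Claim_equal_compute_overall_severity : Prop := ∀ (signals : List (List (String × String))), Dom_compute_overall_severity signals → Pre_compute_overall_severity signals → Spec_compute_overall_severity signals (compute_overall_severity signals)

-- ===== LEMMAS AND PROOFS =====

-- characterisation of B's running-maximum fold, for accumulators in {1,2,3}
theorem pv_fold_char (l : List (List (String × String))) :
    ∀ a : Int, a = 1 ∨ a = 2 ∨ a = 3 →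
    l.foldl (fun acc s => max acc (pvRankOf (pvGetSeverity s))) a =
      if ∃ s ∈ l, pvGetSeverity s = some "critical" then 3
      else if ∃ s ∈ l, pvGetSeverity s = some "moderate" then max a 2
      else a := by
  induction l with
  | nil => intro a _; simp
  | cons s l ih =>
    intro a ha
    simp only [List.foldl_cons]
    by_cases hc : pvGetSeverity s = some "critical"
    · have hr : pvRankOf (pvGetSeverity s) = 3 := by simp [pvRankOf, hc]
      rw [hr]
      have ha3 : max a 3 = 3 := by rcases ha with h|h|h <;> simp [h]
      rw [ha3, ih 3 (by simp)]
      have : ∃ x ∈ s :: l, pvGetSeverity x = some "critical" := ⟨s, by simp, hc⟩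
      simp only [this, if_pos]
      split_ifs <;> simp
    · by_cases hm : pvGetSeverity s = some "moderate"
      · have hr : pvRankOf (pvGetSeverity s) = 2 := by simp [pvRankOf, hm]
        rw [hr]
        have ha' : max a 2 = 1 ∨ max a 2 = 2 ∨ max a 2 = 3 := by
          rcases ha with h|h|h <;> simp [h] <;> omega
        rw [ih _ ha']
        by_cases hcl : ∃ x ∈ l, pvGetSeverity x = some "critical"
        · have : ∃ x ∈ s :: l, pvGetSeverity x = some "critical" := by
            obtain ⟨x, hx, hx2⟩ := hcl; exact ⟨x, by simp [hx], hx2⟩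
          simp [hcl]
        · have hcl' : ¬ ∃ x ∈ s :: l, pvGetSeverity x = some "critical" := by
            simp only [List.mem_cons]; rintro ⟨x, hx | hx, hx2⟩
            · exact hc (hx ▸ hx2)
            · exact hcl ⟨x, hx, hx2⟩
          have hml' : ∃ x ∈ s :: l, pvGetSeverity x = some "moderate" := ⟨s, by simp, hm⟩
          simp only [hcl, hcl', hml', if_neg, if_pos, not_false_eq_true]
          split_ifs <;> omega
      · have hr : pvRankOf (pvGetSeverity s) = 1 := by simp [pvRankOf, hc, hm]
        rw [hr]
        have ha1 : max a 1 = a := by rcases ha with h|h|h <;> simp [h]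
        rw [ha1, ih a ha]
        have ec : (∃ x ∈ s :: l, pvGetSeverity x = some "critical") ↔
            (∃ x ∈ l, pvGetSeverity x = some "critical") := by
          simp only [List.mem_cons]
          constructor
          · rintro ⟨x, hx | hx, hx2⟩
            · exact absurd (hx ▸ hx2) hc
            · exact ⟨x, hx, hx2⟩
          · rintro ⟨x, hx, hx2⟩; exact ⟨x, Or.inr hx, hx2⟩
        have em : (∃ x ∈ s :: l, pvGetSeverity x = some "moderate") ↔
            (∃ x ∈ l, pvGetSeverity x = some "moderate") := by
          simp only [List.mem_cons]
          constructor
          · rintro ⟨x, hx | hx, hx2⟩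
            · exact absurd (hx ▸ hx2) hm
            · exact ⟨x, hx, hx2⟩
          · rintro ⟨x, hx, hx2⟩; exact ⟨x, Or.inr hx, hx2⟩
        simp only [ec, em]

-- ===== VERDICT (by name: the statement is the Claim_ definition above) =====
theorem compute_overall_severity_spec : Claim_equal_compute_overall_severity := by
  intro signals _ _
  unfold Spec_compute_overall_severity compute_overall_severity compute_overall_severity_alt
  by_cases hne : signals = []
  · simp [hne]
  · simp only [hne, if_neg, not_false_eq_true]
    rw [pv_fold_char signals 1 (by simp)]
    by_cases hc : ∃ s ∈ signals, pvGetSeverity s = some "critical"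
    · have hc' : (some "critical") ∈ signals.map pvGetSeverity := by
        obtain ⟨s, hs, h2⟩ := hc; exact List.mem_map.mpr ⟨s, hs, h2⟩
      simp [hc, hc']
    · have hc' : (some "critical") ∉ signals.map pvGetSeverity := by
        intro h; obtain ⟨s, hs, h2⟩ := List.mem_map.mp h; exact hc ⟨s, hs, h2⟩
      by_cases hm : ∃ s ∈ signals, pvGetSeverity s = some "moderate"
      · have hm' : (some "moderate") ∈ signals.map pvGetSeverity := by
          obtain ⟨s, hs, h2⟩ := hm; exact List.mem_map.mpr ⟨s, hs, h2⟩
        simp [hc, hc', hm, hm']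
      · have hm' : (some "moderate") ∉ signals.map pvGetSeverity := by
          intro h; obtain ⟨s, hs, h2⟩ := List.mem_map.mp h; exact hm ⟨s, hs, h2⟩
        simp [hc, hc', hm, hm']
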